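-- pv_equiv track=rewrite | github.com/damienvermeer/hwae | tests/test_ars.py | extract_triggers
-- ===== SOURCE A (Python) =====
-- def extract_triggers(content: str) -> list[str]:
--     """Extract individual triggers from content"""
--     triggers = []
--     current_trigger = []
--     in_trigger = False
--
--     for line in content.split("\n"):
--         if line.startswith("AIRS"):
--             continue
--         if line.startswith("Trigger:"):
--             if current_trigger:
--                 triggers.append("\n".join(current_trigger))
--                 current_trigger = []
--             in_trigger = True
--         if in_trigger:
--             current_trigger.append(line)
--
--     if current_trigger:
--         triggers.append("\n".join(current_trigger))
--
--     return triggers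
-- ===== SOURCE B (Python) =====
-- def extract_triggers(content: str) -> list[str]:
--     lines = [l for l in content.split("\n") if not l.startswith("AIRS")]
--     starts = [i for i, l in enumerate(lines) if l.startswith("Trigger:")]
--     ends = starts[1:] + [len(lines)]
--     return ["\n".join(lines[s:e]) for s, e in zip(starts, ends)]
-- ===== Notes on version B (the rewrite author's own statement) =====
-- stated objective: alternative
-- what changed: Replaces A's single stateful scan (in_trigger flag, pending current_trigger buffer flushed on each new trigger and at the end) by an index-based formulation: filter out the skipped header lines, compute the positions of the trigger marker lines, and build each group as the slice of the line list between consecutive marker positions.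
import Mathlib
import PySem

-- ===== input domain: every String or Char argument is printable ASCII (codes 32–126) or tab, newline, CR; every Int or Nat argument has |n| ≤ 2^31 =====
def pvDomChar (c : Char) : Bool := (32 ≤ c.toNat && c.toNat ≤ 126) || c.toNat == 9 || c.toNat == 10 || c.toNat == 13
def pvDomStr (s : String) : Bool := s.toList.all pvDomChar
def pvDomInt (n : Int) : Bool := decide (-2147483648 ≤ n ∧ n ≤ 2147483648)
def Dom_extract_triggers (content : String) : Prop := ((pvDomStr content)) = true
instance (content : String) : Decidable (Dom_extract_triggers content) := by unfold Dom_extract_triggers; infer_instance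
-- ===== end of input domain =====

-- B replaces A's single stateful scan (in_trigger flag + pending-buffer flush) by an index-based
-- formulation: filter out the skipped header lines, find the positions of the trigger marker lines,
-- and take the slice between consecutive positions as a group; objective: alternative algorithm, same cost.

-- ===== PORT A =====
-- single pass with state (triggers, current_trigger, in_trigger), final flush after the loop
def pvLoopA : List String → List String → List String → Bool → List String × List String × Bool
  | [], ts, cur, it => (ts, cur, it)
  | l :: ls, ts, cur, it =>
    if PySem.Str.startswith l "AIRS" then pvLoopA ls ts cur it
    else
      let p := if PySem.Str.startswith l "Trigger:" then
                 (if cur ≠ [] then (ts ++ [PySem.Str.join "\n" cur], ([] : List String)) else (ts, cur))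
               else (ts, cur)
      let it' := if PySem.Str.startswith l "Trigger:" then true else it
      if it' then pvLoopA ls p.1 (p.2 ++ [l]) it' else pvLoopA ls p.1 p.2 it'

def extract_triggers (content : String) : List String :=
  let st := pvLoopA (((PySem.Str.split? content "\n").getD [])) [] [] false
  if st.2.1 ≠ [] then st.1 ++ [PySem.Str.join "\n" st.2.1] else st.1

-- ===== PORT B =====
-- lines = AIRS-free lines; starts = indices of 'Trigger:' lines; groups = slices between them
def extract_triggers_alt (content : String) : List String :=
  let lines := (((PySem.Str.split? content "\n").getD [])).filter (fun l => !(PySem.Str.startswith l "AIRS"))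
  let starts := ((PySem.List.enumerate lines 0).filter (fun p => PySem.Str.startswith p.2 "Trigger:")).map (fun p => p.1)
  let ends := PySem.List.slice starts (some 1) none ++ [(lines.length : Int)]
  (starts.zip ends).map (fun p => PySem.Str.join "\n" (PySem.List.slice lines (some p.1) (some p.2)))

-- ===== PRECONDITION & SPEC =====
def Spec_extract_triggers (content : String) (out : List String) : Prop := out = extract_triggers_alt content
instance (content : String) (out : List String) : Decidable (Spec_extract_triggers content out) := by unfold Spec_extract_triggers; infer_instance

-- ===== CLAIM (what is proved, stated in full; the proofs are below) =====
def Claim_equal_extract_triggers : Prop := ∀ (content : String), Dom_extract_triggers content → Spec_extract_triggers content (extract_triggers content)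

-- ===== LEMMAS AND PROOFS =====

-- A's post-loop flush, as a function of the loop state
def pvFinishA (st : List String × List String × Bool) : List String :=
  if st.2.1 ≠ [] then st.1 ++ [PySem.Str.join "\n" st.2.1] else st.1

-- reference grouping: each 'Trigger:' line opens a group reaching to the next 'Trigger:' line
def pvSpec : List String → List (List String)
  | [] => []
  | l :: ls =>
    if PySem.Str.startswith l "Trigger:" then
      (l :: ls.takeWhile (fun x => !(PySem.Str.startswith x "Trigger:"))) :: pvSpec ls
    else pvSpec ls

-- Nat-valued positions of the 'Trigger:' lines
def pvStartsN : List String → List Nat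
  | [] => []
  | l :: ls =>
    (if PySem.Str.startswith l "Trigger:" then [0] else []) ++ (pvStartsN ls).map (· + 1)

-- consecutive (start, end) pairs
def pvPairsN (s : List Nat) (n : Nat) : List (Nat × Nat) := s.zip (s.drop 1 ++ [n])

theorem pv_startsN_eq (ls : List String) : ∀ (s : Int),
    ((PySem.List.enumerate ls s).filter (fun p => PySem.Str.startswith p.2 "Trigger:")).map (fun p => p.1)
      = (pvStartsN ls).map (fun k => s + (k : Int)) := by
  induction ls with
  | nil => intro s; simp [PySem.List.enumerate_nil, pvStartsN]
  | cons l ls ih =>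
    intro s
    have ih' := ih (s+1)
    simp at ih'
    rw [PySem.List.enumerate_cons]
    by_cases hT : PySem.Chars.startswith l.toList ['T','r','i','g','g','e','r',':'] = true
    · simp [pvStartsN, hT, ih', List.flatMap_map, List.map_flatMap, Nat.cast_add, add_comm, add_left_comm]
    · simp [pvStartsN, hT, ih', List.flatMap_map, List.map_flatMap, Nat.cast_add, add_comm, add_left_comm]

theorem pv_pairsN_shift (s : List Nat) (n : Nat) :
    pvPairsN (s.map (· + 1)) (n + 1) = (pvPairsN s n).map (fun p => (p.1 + 1, p.2 + 1)) := by
  unfold pvPairsN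
  rw [← List.map_drop]
  have h : ([n + 1] : List Nat) = [n].map (· + 1) := rfl
  rw [h, ← List.map_append, List.zip_map]
  simp [Prod.map]

theorem pv_pairsN_cons (s : List Nat) (n : Nat) :
    pvPairsN (0 :: s.map (· + 1)) (n + 1)
      = (0, s.headD n + 1) :: (pvPairsN s n).map (fun p => (p.1 + 1, p.2 + 1)) := by
  cases s with
  | nil => rfl
  | cons a s' =>
    show ((0 :: (a + 1) :: s'.map (· + 1)).zip ((((a+1) :: s'.map (· + 1))) ++ [n+1])) = _
    rw [List.cons_append, List.zip_cons_cons]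
    congr 1
    have h : ((a + 1) :: s'.map (· + 1)) ++ [n + 1] = ((s' ++ [n]).map (· + 1)).cons (a+1) := by simp
    have h2 : ((a + 1) :: s'.map (· + 1)).zip (s'.map (· + 1) ++ [n + 1])
        = ((a :: s').map (· + 1)).zip ((s' ++ [n]).map (· + 1)) := by simp
    rw [h2, List.zip_map]
    show _ = List.map _ ((a :: s').zip ((a :: s').drop 1 ++ [n]))
    simp [Prod.map]

theorem pv_take_headD (ls : List String) :
    ls.take ((pvStartsN ls).headD ls.length)
      = ls.takeWhile (fun x => !(PySem.Str.startswith x "Trigger:")) := by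
  induction ls with
  | nil => rfl
  | cons l ls ih =>
    by_cases hT : PySem.Chars.startswith l.toList ['T','r','i','g','g','e','r',':'] = true
    · simp [pvStartsN, hT]
    · have h1 : pvStartsN (l :: ls) = (pvStartsN ls).map (· + 1) := by simp [pvStartsN, hT]
      rw [h1]
      have hh : ((pvStartsN ls).map (· + 1)).headD (l :: ls).length = (pvStartsN ls).headD ls.length + 1 := by
        cases h : pvStartsN ls <;> simp
      rw [hh, List.take_succ_cons, List.takeWhile_cons]
      simp [hT]
      simpa using ih

theorem pv_slices_eq_spec (ls : List String) :
    (pvPairsN (pvStartsN ls) ls.length).map (fun p => (ls.drop p.1).take (p.2 - p.1)) = pvSpec ls := by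
  induction ls with
  | nil => rfl
  | cons l ls ih =>
    by_cases hT : PySem.Chars.startswith l.toList ['T','r','i','g','g','e','r',':'] = true
    · have h1 : pvStartsN (l :: ls) = 0 :: (pvStartsN ls).map (· + 1) := by simp [pvStartsN, hT]
      rw [h1, List.length_cons, pv_pairsN_cons, List.map_cons, List.map_map]
      have hfirst : ((l :: ls).drop 0).take ((pvStartsN ls).headD ls.length + 1 - 0)
          = l :: ls.takeWhile (fun x => !(PySem.Str.startswith x "Trigger:")) := by
        rw [List.drop_zero, Nat.sub_zero, List.take_succ_cons, pv_take_headD]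
      have hrest : ∀ p : Nat × Nat, (((l :: ls).drop (p.1 + 1)).take (p.2 + 1 - (p.1 + 1)))
          = ((ls.drop p.1).take (p.2 - p.1)) := by
        intro p; rw [List.drop_succ_cons, Nat.succ_sub_succ]
      calc ((l :: ls).drop 0).take ((pvStartsN ls).headD ls.length + 1 - 0)
            :: List.map ((fun p => ((l :: ls).drop p.1).take (p.2 - p.1)) ∘ fun p => (p.1 + 1, p.2 + 1)) (pvPairsN (pvStartsN ls) ls.length)
          = (l :: ls.takeWhile (fun x => !(PySem.Str.startswith x "Trigger:")))
            :: List.map (fun p => (ls.drop p.1).take (p.2 - p.1)) (pvPairsN (pvStartsN ls) ls.length) := by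
            rw [hfirst]; congr 1; apply List.map_congr_left; intro p _; exact hrest p
        _ = (l :: ls.takeWhile (fun x => !(PySem.Str.startswith x "Trigger:"))) :: pvSpec ls := by rw [ih]
        _ = pvSpec (l :: ls) := by simp [pvSpec, hT]
    · have h1 : pvStartsN (l :: ls) = (pvStartsN ls).map (· + 1) := by simp [pvStartsN, hT]
      rw [h1, List.length_cons, pv_pairsN_shift, List.map_map]
      have : List.map ((fun p => ((l :: ls).drop p.1).take (p.2 - p.1)) ∘ fun p => (p.1 + 1, p.2 + 1)) (pvPairsN (pvStartsN ls) ls.length)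
          = List.map (fun p => (ls.drop p.1).take (p.2 - p.1)) (pvPairsN (pvStartsN ls) ls.length) := by
        apply List.map_congr_left; intro p _
        show ((l :: ls).drop (p.1 + 1)).take (p.2 + 1 - (p.1 + 1)) = _
        rw [List.drop_succ_cons, Nat.succ_sub_succ]
      rw [this, ih]
      simp [pvSpec, hT]

theorem pv_alt_eq (lines : List String) :
    (((((PySem.List.enumerate lines 0).filter (fun p => PySem.Str.startswith p.2 "Trigger:")).map (fun p => p.1)).zip
        (PySem.List.slice (((PySem.List.enumerate lines 0).filter (fun p => PySem.Str.startswith p.2 "Trigger:")).map (fun p => p.1)) (some 1) none ++ [(lines.length : Int)])).map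
      (fun p => PySem.Str.join "\n" (PySem.List.slice lines (some p.1) (some p.2))))
      = (pvSpec lines).map (fun g => PySem.Str.join "\n" g) := by
  have hs : ((PySem.List.enumerate lines 0).filter (fun p => PySem.Str.startswith p.2 "Trigger:")).map (fun p => p.1)
      = (pvStartsN lines).map (fun (k : Nat) => (k : Int)) := by
    rw [pv_startsN_eq lines 0]
    simp only [zero_add]
    rw [show (fun (k : Int) => k) = id from rfl, List.map_id]
    exact Eq.symm List.map_eq_flatMap
  rw [hs, PySem.List.slice_from_one]
  have h1 : ((pvStartsN lines).map (fun (k : Nat) => (k : Int))).tail ++ [(lines.length : Int)]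
      = ((pvStartsN lines).drop 1 ++ [lines.length]).map (fun (k : Nat) => (k : Int)) := by
    rw [List.map_append, List.map_singleton, ← List.map_tail, List.drop_one]
  rw [h1, List.zip_map, List.map_map, ← pv_slices_eq_spec lines, List.map_map]
  exact List.map_congr_left (fun p _ => by
    show PySem.Str.join "\n" (PySem.List.slice lines (some (p.1 : Int)) (some (p.2 : Int))) = _
    rw [PySem.List.slice_natCast]; rfl)

theorem pv_main (ls : List String) : ∀ (gs : List (List String)) (cur : List String), cur ≠ [] →
    pvFinishA (pvLoopA ls (gs.map (PySem.Str.join "\n")) cur true)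
      = (gs ++ ((cur ++ (ls.filter (fun l => !(PySem.Str.startswith l "AIRS"))).takeWhile (fun x => !(PySem.Str.startswith x "Trigger:")))
          :: pvSpec (ls.filter (fun l => !(PySem.Str.startswith l "AIRS"))))).map (PySem.Str.join "\n") := by
  induction ls with
  | nil => intro gs cur h; simp [pvLoopA, pvFinishA, pvSpec, h]
  | cons l ls ih =>
    intro gs cur h
    by_cases hA : PySem.Chars.startswith l.toList ['A','I','R','S'] = true
    · simpa [pvLoopA, hA] using ih gs cur h
    · by_cases hT : PySem.Chars.startswith l.toList ['T','r','i','g','g','e','r',':'] = true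
      · have := ih (gs ++ [cur]) [l] (by simp)
        simpa [pvLoopA, pvSpec, hA, hT, h] using this
      · have := ih gs (cur ++ [l]) (by simp)
        simpa [pvLoopA, pvSpec, hA, hT] using this

theorem pv_start (ls : List String) :
    pvFinishA (pvLoopA ls [] [] false)
      = (pvSpec (ls.filter (fun l => !(PySem.Str.startswith l "AIRS")))).map (fun g => PySem.Str.join "\n" g) := by
  induction ls with
  | nil => simp [pvLoopA, pvFinishA, pvSpec]
  | cons l ls ih =>
    by_cases hA : PySem.Chars.startswith l.toList ['A','I','R','S'] = true
    · simpa [pvLoopA, hA] using ih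
    · by_cases hT : PySem.Chars.startswith l.toList ['T','r','i','g','g','e','r',':'] = true
      · have := pv_main ls [] [l] (by simp)
        simpa [pvLoopA, pvSpec, hA, hT] using this
      · simpa [pvLoopA, pvSpec, hA, hT] using ih

-- ===== VERDICT (by name: the statement is the Claim_ definition above) =====
theorem extract_triggers_spec : Claim_equal_extract_triggers := by
  intro content _
  unfold Spec_extract_triggers extract_triggers extract_triggers_alt
  rw [pv_alt_eq]
  exact pv_start (((PySem.Str.split? content "\n").getD []))
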